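-- pv_equiv track=rewrite | github.com/provide-io/wrknv | mutants/src/wrknv/wenv/operations/verify.py | x_parse_tofu_version__mutmut_7
-- ===== SOURCE A (Python) =====
-- def x_parse_tofu_version__mutmut_7(output: str) -> dict[str, str]:
--     """Parse OpenTofu version output."""
--
--     # Example: "OpenTofu v1.6.0"
--     lines = output.split("\n")
--
--     info = {"tool": "XXtofuXX"}
--
--     for line in lines:
--         line = line.strip()
--         if line.startswith("OpenTofu v"):
--             version = line.replace("OpenTofu v", "")
--             info["version"] = version
--         elif line.startswith("on "):
--             # Extract platform from "on darwin_arm64" format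
--             info["platform"] = line.replace("on ", "").strip()
--
--     return info
-- ===== SOURCE B (Python) =====
-- def x_parse_tofu_version__mutmut_7(output: str) -> dict[str, str]:
--     """Parse OpenTofu version output: last matching line wins for each field."""
--     lines = [line.strip() for line in output.split("\n")]
--     info = {"tool": "XXtofuXX"}
--     version_lines = [l for l in lines if l.startswith("OpenTofu v")]
--     if version_lines:
--         info["version"] = version_lines[-1].replace("OpenTofu v", "")
--     platform_lines = [l for l in lines if l.startswith("on ")]
--     if platform_lines:
--         info["platform"] = platform_lines[-1].replace("on ", "").strip()
--     return info
-- ===== Notes on version B (the rewrite author's own statement) =====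
-- stated objective: simpler
-- what changed: Replaces A's stateful per-line loop with two declarative filters taking the last matching line for each field; Pre_ excludes inputs where an 'on ' line precedes every 'OpenTofu v' line while both occur, on which A's dict key-insertion order (platform before version) is accidental.
import Mathlib
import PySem

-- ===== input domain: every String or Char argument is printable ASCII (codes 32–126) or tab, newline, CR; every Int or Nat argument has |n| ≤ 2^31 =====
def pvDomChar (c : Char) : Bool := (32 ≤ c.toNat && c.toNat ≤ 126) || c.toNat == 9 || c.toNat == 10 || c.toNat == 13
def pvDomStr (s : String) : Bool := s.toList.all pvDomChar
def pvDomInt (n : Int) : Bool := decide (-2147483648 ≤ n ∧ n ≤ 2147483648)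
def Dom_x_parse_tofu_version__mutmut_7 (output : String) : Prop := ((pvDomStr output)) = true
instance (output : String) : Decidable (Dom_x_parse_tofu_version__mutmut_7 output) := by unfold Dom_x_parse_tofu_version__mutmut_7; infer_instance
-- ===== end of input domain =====

-- B replaces A's stateful line loop by two declarative filters (last matching line wins per
-- field, version then platform); same cost, no speed claim.

-- s.split("\n") — via PySem.Chars.splitOn (exact for a nonempty separator); used by both ports
def pvSplitNL (s : String) : List String :=
  (PySem.Chars.splitOn s.toList "\n".toList).map String.ofList

-- ===== PORT A =====
def pvStepA (info : PySem.Dict String String) (line : String) : PySem.Dict String String :=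
  let line := PySem.Str.strip line
  if PySem.Str.startswith line "OpenTofu v" then
    info.insert "version" (PySem.Str.replace line "OpenTofu v" "")
  else if PySem.Str.startswith line "on " then
    info.insert "platform" (PySem.Str.strip (PySem.Str.replace line "on " ""))
  else info

def x_parse_tofu_version__mutmut_7 (output : String) : List (String × String) :=
  let lines := pvSplitNL output
  let info := PySem.Dict.ofList [("tool", "XXtofuXX")]
  (lines.foldl pvStepA info).items

-- ===== PORT B =====
def pvPredV (l : String) : Bool := PySem.Str.startswith l "OpenTofu v"
def pvPredP (l : String) : Bool := PySem.Str.startswith l "on "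
def pvValV (l : String) : String := PySem.Str.replace l "OpenTofu v" ""
def pvValP (l : String) : String := PySem.Str.strip (PySem.Str.replace l "on " "")

def x_parse_tofu_version__mutmut_7_alt (output : String) : List (String × String) :=
  let lines := (pvSplitNL output).map PySem.Str.strip
  let info := PySem.Dict.ofList [("tool", "XXtofuXX")]
  let info :=
    match ((lines.filter pvPredV).getLast?) with
    | some l => info.insert "version" (pvValV l)
    | none => info
  let info :=
    match ((lines.filter pvPredP).getLast?) with
    | some l => info.insert "platform" (pvValP l)
    | none => info
  info.items

-- ===== PRECONDITION & SPEC =====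
-- Pre_ excludes inputs on which A still returns: those where both a version and a platform line
-- occur but the first "on " line precedes the first "OpenTofu v" line — there A's dict
-- key-insertion order (platform before version) is an accident of line order, while B always
-- inserts version first; the mappings are identical.
def Pre_x_parse_tofu_version__mutmut_7 (output : String) : Prop :=
  (((pvSplitNL output).map PySem.Str.strip).any pvPredV = true ∧
   ((pvSplitNL output).map PySem.Str.strip).any pvPredP = true) →
  ((pvSplitNL output).map PySem.Str.strip).findIdx pvPredV <
    ((pvSplitNL output).map PySem.Str.strip).findIdx pvPredP
instance (output : String) : Decidable (Pre_x_parse_tofu_version__mutmut_7 output) := by unfold Pre_x_parse_tofu_version__mutmut_7; infer_instance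

def pvWitness_x_parse_tofu_version__mutmut_7 : String := "OpenTofu v1.6.0\non darwin_arm64"

def Spec_x_parse_tofu_version__mutmut_7 (output : String) (out : List (String × String)) : Prop := out = x_parse_tofu_version__mutmut_7_alt output
instance (output : String) (out : List (String × String)) : Decidable (Spec_x_parse_tofu_version__mutmut_7 output out) := by unfold Spec_x_parse_tofu_version__mutmut_7; infer_instance

-- ===== CLAIM =====
def Claim_equal_x_parse_tofu_version__mutmut_7 : Prop := ∀ (output : String), Dom_x_parse_tofu_version__mutmut_7 output → Pre_x_parse_tofu_version__mutmut_7 output → Spec_x_parse_tofu_version__mutmut_7 output (x_parse_tofu_version__mutmut_7 output)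

-- ===== LEMMAS AND PROOFS =====

-- A's loop step, on an already-stripped line.
def pvSStep (info : PySem.Dict String String) (l : String) : PySem.Dict String String :=
  if pvPredV l then info.insert "version" (pvValV l)
  else if pvPredP l then info.insert "platform" (pvValP l)
  else info

-- last "OpenTofu v"/"on " match values of a (stripped) line list
def pvLastV (ls : List String) : Option String := ((ls.filter pvPredV).getLast?).map pvValV
def pvLastP (ls : List String) : Option String := ((ls.filter pvPredP).getLast?).map pvValP

-- the small dict states A's loop ranges over
def pvMk0 : PySem.Dict String String := PySem.Dict.mk [("tool", "XXtofuXX")]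
def pvMkV (v : String) : PySem.Dict String String := PySem.Dict.mk [("tool", "XXtofuXX"), ("version", v)]
def pvMkP (p : String) : PySem.Dict String String := PySem.Dict.mk [("tool", "XXtofuXX"), ("platform", p)]
def pvMkVP (v p : String) : PySem.Dict String String := PySem.Dict.mk [("tool", "XXtofuXX"), ("version", v), ("platform", p)]
def pvMkPV (p v : String) : PySem.Dict String String := PySem.Dict.mk [("tool", "XXtofuXX"), ("platform", p), ("version", v)]

-- A's result as a function of the stripped lines
def pvCore (ls : List String) : PySem.Dict String String :=
  match pvLastV ls, pvLastP ls with
  | some v, some p =>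
      if ls.findIdx pvPredV < ls.findIdx pvPredP then pvMkVP v p else pvMkPV p v
  | some v, none => pvMkV v
  | none, some p => pvMkP p
  | none, none => pvMk0

-- a line starting with "OpenTofu v" does not start with "on ", and conversely
theorem pvPredV_not_pvPredP (l : String) (h : pvPredV l = true) : pvPredP l = false := by
  by_contra hc
  simp only [Bool.not_eq_false] at hc
  rw [pvPredV, PySem.Str.startswith_eq, PySem.Chars.startswith_iff] at h
  rw [pvPredP, PySem.Str.startswith_eq, PySem.Chars.startswith_iff] at hc
  have := List.prefix_of_prefix_length_le hc h (by simp)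
  revert this; decide

theorem pvLastV_cons_pos (l : String) (ls : List String) (h : pvPredV l = true) :
    pvLastV (l :: ls) = some ((pvLastV ls).getD (pvValV l)) := by
  simp only [pvLastV, List.filter_cons, h, if_true, List.getLast?_cons]
  cases hf : (ls.filter pvPredV).getLast? <;> simp [hf]

theorem pvLastV_cons_neg (l : String) (ls : List String) (h : pvPredV l = false) :
    pvLastV (l :: ls) = pvLastV ls := by simp [pvLastV, h]

theorem pvLastP_cons_pos (l : String) (ls : List String) (h : pvPredP l = true) :
    pvLastP (l :: ls) = some ((pvLastP ls).getD (pvValP l)) := by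
  simp only [pvLastP, List.filter_cons, h, if_true, List.getLast?_cons]
  cases hf : (ls.filter pvPredP).getLast? <;> simp [hf]

theorem pvLastP_cons_neg (l : String) (ls : List String) (h : pvPredP l = false) :
    pvLastP (l :: ls) = pvLastP ls := by simp [pvLastP, h]

-- both keys present: each further line overwrites in place
theorem pvFold_VP : ∀ (ls : List String) (v p : String),
    ls.foldl pvSStep (pvMkVP v p) = pvMkVP ((pvLastV ls).getD v) ((pvLastP ls).getD p) := by
  intro ls
  induction ls with
  | nil => intro v p; simp [pvLastV, pvLastP]
  | cons l ls ih =>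
    intro v p
    by_cases hv : pvPredV l = true
    · have hp := pvPredV_not_pvPredP l hv
      simp only [List.foldl_cons, pvSStep, hv, if_true]
      have : (pvMkVP v p).insert "version" (pvValV l) = pvMkVP (pvValV l) p := by
        simp [pvMkVP, PySem.Dict.insert]
      rw [this, ih, pvLastV_cons_pos _ _ hv, pvLastP_cons_neg _ _ hp]
      cases hlv : pvLastV ls <;> simp [hlv]
    · simp only [Bool.not_eq_true] at hv
      by_cases hp : pvPredP l = true
      · simp only [List.foldl_cons, pvSStep, hv, hp, Bool.false_eq_true, if_true, if_false]
        have : (pvMkVP v p).insert "platform" (pvValP l) = pvMkVP v (pvValP l) := by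
          simp [pvMkVP, PySem.Dict.insert]
        rw [this, ih, pvLastV_cons_neg _ _ hv, pvLastP_cons_pos _ _ hp]
        cases hlp : pvLastP ls <;> simp [hlp]
      · simp only [Bool.not_eq_true] at hp
        simp only [List.foldl_cons, pvSStep, hv, hp, Bool.false_eq_true, if_false]
        rw [ih, pvLastV_cons_neg _ _ hv, pvLastP_cons_neg _ _ hp]

theorem pvFold_PV : ∀ (ls : List String) (p v : String),
    ls.foldl pvSStep (pvMkPV p v) = pvMkPV ((pvLastP ls).getD p) ((pvLastV ls).getD v) := by
  intro ls
  induction ls with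
  | nil => intro p v; simp [pvLastV, pvLastP]
  | cons l ls ih =>
    intro p v
    by_cases hv : pvPredV l = true
    · have hp := pvPredV_not_pvPredP l hv
      simp only [List.foldl_cons, pvSStep, hv, if_true]
      have : (pvMkPV p v).insert "version" (pvValV l) = pvMkPV p (pvValV l) := by
        simp [pvMkPV, PySem.Dict.insert]
      rw [this, ih, pvLastV_cons_pos _ _ hv, pvLastP_cons_neg _ _ hp]
      cases hlv : pvLastV ls <;> simp [hlv]
    · simp only [Bool.not_eq_true] at hv
      by_cases hp : pvPredP l = true
      · simp only [List.foldl_cons, pvSStep, hv, hp, Bool.false_eq_true, if_true, if_false]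
        have : (pvMkPV p v).insert "platform" (pvValP l) = pvMkPV (pvValP l) v := by
          simp [pvMkPV, PySem.Dict.insert]
        rw [this, ih, pvLastV_cons_neg _ _ hv, pvLastP_cons_pos _ _ hp]
        cases hlp : pvLastP ls <;> simp [hlp]
      · simp only [Bool.not_eq_true] at hp
        simp only [List.foldl_cons, pvSStep, hv, hp, Bool.false_eq_true, if_false]
        rw [ih, pvLastV_cons_neg _ _ hv, pvLastP_cons_neg _ _ hp]

-- only "version" present so far: the keys stay in version-first order
theorem pvFold_V : ∀ (ls : List String) (v : String),
    ls.foldl pvSStep (pvMkV v) =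
      match pvLastP ls with
      | some p => pvMkVP ((pvLastV ls).getD v) p
      | none => pvMkV ((pvLastV ls).getD v) := by
  intro ls
  induction ls with
  | nil => intro v; simp [pvLastV, pvLastP]
  | cons l ls ih =>
    intro v
    by_cases hv : pvPredV l = true
    · have hp := pvPredV_not_pvPredP l hv
      simp only [List.foldl_cons, pvSStep, hv, if_true]
      have : (pvMkV v).insert "version" (pvValV l) = pvMkV (pvValV l) := by
        simp [pvMkV, PySem.Dict.insert]
      rw [this, ih, pvLastV_cons_pos _ _ hv, pvLastP_cons_neg _ _ hp]
      cases hlp : pvLastP ls <;> cases hlv : pvLastV ls <;> simp [hlv]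
    · simp only [Bool.not_eq_true] at hv
      by_cases hp : pvPredP l = true
      · simp only [List.foldl_cons, pvSStep, hv, hp, Bool.false_eq_true, if_true, if_false]
        have : (pvMkV v).insert "platform" (pvValP l) = pvMkVP v (pvValP l) := by
          simp [pvMkV, pvMkVP, PySem.Dict.insert]
        rw [this, pvFold_VP, pvLastV_cons_neg _ _ hv, pvLastP_cons_pos _ _ hp]
      · simp only [Bool.not_eq_true] at hp
        simp only [List.foldl_cons, pvSStep, hv, hp, Bool.false_eq_true, if_false]
        rw [ih, pvLastV_cons_neg _ _ hv, pvLastP_cons_neg _ _ hp]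

-- only "platform" present so far: the keys stay in platform-first order
theorem pvFold_P : ∀ (ls : List String) (p : String),
    ls.foldl pvSStep (pvMkP p) =
      match pvLastV ls with
      | some v => pvMkPV ((pvLastP ls).getD p) v
      | none => pvMkP ((pvLastP ls).getD p) := by
  intro ls
  induction ls with
  | nil => intro p; simp [pvLastV, pvLastP]
  | cons l ls ih =>
    intro p
    by_cases hv : pvPredV l = true
    · have hp := pvPredV_not_pvPredP l hv
      simp only [List.foldl_cons, pvSStep, hv, if_true]
      have : (pvMkP p).insert "version" (pvValV l) = pvMkPV p (pvValV l) := by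
        simp [pvMkP, pvMkPV, PySem.Dict.insert]
      rw [this, pvFold_PV, pvLastV_cons_pos _ _ hv, pvLastP_cons_neg _ _ hp]
    · simp only [Bool.not_eq_true] at hv
      by_cases hp : pvPredP l = true
      · simp only [List.foldl_cons, pvSStep, hv, hp, Bool.false_eq_true, if_true, if_false]
        have : (pvMkP p).insert "platform" (pvValP l) = pvMkP (pvValP l) := by
          simp [pvMkP, PySem.Dict.insert]
        rw [this, ih, pvLastV_cons_neg _ _ hv, pvLastP_cons_pos _ _ hp]
        cases hlv : pvLastV ls <;> cases hlp : pvLastP ls <;> simp [hlp]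
      · simp only [Bool.not_eq_true] at hp
        simp only [List.foldl_cons, pvSStep, hv, hp, Bool.false_eq_true, if_false]
        rw [ih, pvLastV_cons_neg _ _ hv, pvLastP_cons_neg _ _ hp]

-- a line matching neither prefix leaves pvCore unchanged
theorem pvCore_cons_neg (l : String) (ls : List String) (hv : pvPredV l = false)
    (hp : pvPredP l = false) : pvCore (l :: ls) = pvCore ls := by
  rw [pvCore, pvCore, pvLastV_cons_neg _ _ hv, pvLastP_cons_neg _ _ hp]
  cases hlv : pvLastV ls <;> cases hlp : pvLastP ls <;> simp only []
  have hiv : (l :: ls).findIdx pvPredV = ls.findIdx pvPredV + 1 := by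
    simp [List.findIdx_cons, hv]
  have hip : (l :: ls).findIdx pvPredP = ls.findIdx pvPredP + 1 := by
    simp [List.findIdx_cons, hp]
  simp only [hiv, hip, Nat.add_lt_add_iff_right]

-- main loop invariant: from the initial dict, A's loop computes pvCore
theorem pvFold_main : ∀ (ls : List String), ls.foldl pvSStep pvMk0 = pvCore ls := by
  intro ls
  induction ls with
  | nil => simp [pvCore, pvLastV, pvLastP]
  | cons l ls ih =>
    by_cases hv : pvPredV l = true
    · have hp := pvPredV_not_pvPredP l hv
      simp only [List.foldl_cons, pvSStep, hv, if_true]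
      have : pvMk0.insert "version" (pvValV l) = pvMkV (pvValV l) := by
        simp [pvMk0, pvMkV, PySem.Dict.insert]
      rw [this, pvFold_V]
      rw [pvCore, pvLastV_cons_pos _ _ hv, pvLastP_cons_neg _ _ hp]
      cases hlp : pvLastP ls with
      | none => simp
      | some p =>
        have hiv : (l :: ls).findIdx pvPredV = 0 := by simp [List.findIdx_cons, hv]
        have hip : (l :: ls).findIdx pvPredP = ls.findIdx pvPredP + 1 := by
          simp [List.findIdx_cons, hp]
        simp only [hiv, hip]
        simp
    · simp only [Bool.not_eq_true] at hv
      by_cases hp : pvPredP l = true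
      · simp only [List.foldl_cons, pvSStep, hv, hp, Bool.false_eq_true, if_true, if_false]
        have : pvMk0.insert "platform" (pvValP l) = pvMkP (pvValP l) := by
          simp [pvMk0, pvMkP, PySem.Dict.insert]
        rw [this, pvFold_P]
        rw [pvCore, pvLastV_cons_neg _ _ hv, pvLastP_cons_pos _ _ hp]
        cases hlv : pvLastV ls with
        | none => simp
        | some v =>
          have hiv : (l :: ls).findIdx pvPredV = ls.findIdx pvPredV + 1 := by
            simp [List.findIdx_cons, hv]
          have hip : (l :: ls).findIdx pvPredP = 0 := by simp [List.findIdx_cons, hp]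
          simp only [hiv, hip]
          simp
      · simp only [Bool.not_eq_true] at hp
        simp only [List.foldl_cons, pvSStep, hv, hp, Bool.false_eq_true, if_false]
        rw [ih, pvCore_cons_neg _ _ hv hp]

-- pvLastV is some exactly when some line matches pvPredV (and likewise for pvPredP)
theorem pvLastV_isSome_iff_any (ls : List String) :
    (pvLastV ls).isSome = true ↔ ls.any pvPredV = true := by
  rw [pvLastV, Option.isSome_map, List.getLast?_isSome]
  constructor
  · intro h
    rcases List.ne_nil_iff_exists_cons.mp h with ⟨a, t, ht⟩
    have ha : a ∈ ls.filter pvPredV := by rw [ht]; exact List.mem_cons_self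
    rcases List.mem_filter.mp ha with ⟨hm, hpr⟩
    exact List.any_eq_true.mpr ⟨a, hm, hpr⟩
  · intro h
    rcases List.any_eq_true.mp h with ⟨a, hm, hpr⟩
    exact List.ne_nil_of_mem (List.mem_filter.mpr ⟨hm, hpr⟩)

theorem pvLastP_isSome_iff_any (ls : List String) :
    (pvLastP ls).isSome = true ↔ ls.any pvPredP = true := by
  rw [pvLastP, Option.isSome_map, List.getLast?_isSome]
  constructor
  · intro h
    rcases List.ne_nil_iff_exists_cons.mp h with ⟨a, t, ht⟩
    have ha : a ∈ ls.filter pvPredP := by rw [ht]; exact List.mem_cons_self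
    rcases List.mem_filter.mp ha with ⟨hm, hpr⟩
    exact List.any_eq_true.mpr ⟨a, hm, hpr⟩
  · intro h
    rcases List.any_eq_true.mp h with ⟨a, hm, hpr⟩
    exact List.ne_nil_of_mem (List.mem_filter.mpr ⟨hm, hpr⟩)

-- B's result as a function of the stripped lines
theorem pvAlt_eq (output : String) :
    x_parse_tofu_version__mutmut_7_alt output =
      (match pvLastV ((pvSplitNL output).map PySem.Str.strip),
             pvLastP ((pvSplitNL output).map PySem.Str.strip) with
       | some v, some p => [("tool", "XXtofuXX"), ("version", v), ("platform", p)]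
       | some v, none => [("tool", "XXtofuXX"), ("version", v)]
       | none, some p => [("tool", "XXtofuXX"), ("platform", p)]
       | none, none => [("tool", "XXtofuXX")]) := by
  rw [x_parse_tofu_version__mutmut_7_alt]
  simp only [pvLastV, pvLastP]
  cases hv : ((pvSplitNL output).map PySem.Str.strip).filter pvPredV |>.getLast? <;>
    cases hp : ((pvSplitNL output).map PySem.Str.strip).filter pvPredP |>.getLast? <;>
      simp only [hv, hp, Option.map_some, Option.map_none] <;>
      rfl

-- ===== VERDICT (by name: the statement is the Claim_ definition above) =====
theorem x_parse_tofu_version__mutmut_7_spec : Claim_equal_x_parse_tofu_version__mutmut_7 := by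
  intro output _ hpre
  unfold Spec_x_parse_tofu_version__mutmut_7
  show (List.foldl pvStepA (PySem.Dict.ofList [("tool", "XXtofuXX")]) (pvSplitNL output)).items
      = x_parse_tofu_version__mutmut_7_alt output
  have h0 : PySem.Dict.ofList [("tool", "XXtofuXX")] = pvMk0 := by decide
  have hmap : List.foldl pvStepA pvMk0 (pvSplitNL output)
      = List.foldl pvSStep pvMk0 ((pvSplitNL output).map PySem.Str.strip) := by
    rw [List.foldl_map]
    rfl
  rw [h0, hmap, pvFold_main, pvAlt_eq]
  set ls := (pvSplitNL output).map PySem.Str.strip with hls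
  unfold Pre_x_parse_tofu_version__mutmut_7 at hpre
  rw [← hls] at hpre
  rw [pvCore]
  cases hlv : pvLastV ls <;> cases hlp : pvLastP ls
  · rfl
  · rfl
  · rfl
  · have hlt : ls.findIdx pvPredV < ls.findIdx pvPredP := by
      apply hpre
      constructor
      · exact (pvLastV_isSome_iff_any ls).mp (by rw [hlv]; rfl)
      · exact (pvLastP_isSome_iff_any ls).mp (by rw [hlp]; rfl)
    simp only [if_pos hlt, pvMkVP, PySem.Dict.items]
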